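-- pv_equiv track=rewrite | github.com/anssijun/aoc2022 | day17.py | get_rock_starting_coords
-- ===== SOURCE A (Python) =====
-- def get_rock_starting_coords(rock: list[int | None], highest_rock: int) -> list[list[int | None]]:
--     # Calculates the coords where the rock starts falling from
--     coords = []
--     for idx, i in enumerate(rock):
--         # In rock's representation, 0 is an "empty" space and 1 is solid rock. This is needed as rocks can be oddly shaped.
--         # We only care about solid rock in this case.
--         if i == 1:
--             # Build vertical ranges of solid rock
--             if coords:
--                 coords[-1][1] += 1
--             else:
--                 coords.append([highest_rock + 4 + idx, highest_rock + 4 + idx])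
--     return coords
-- ===== SOURCE B (Python) =====
-- def get_rock_starting_coords(rock, highest_rock):
--     # Closed form: the loop only ever holds one range, seeded at the first
--     # solid cell and extended once per further solid cell.
--     if 1 not in rock:
--         return []
--     start = highest_rock + 4 + rock.index(1)
--     return [[start, start + rock.count(1) - 1]]
-- ===== Notes on version B (the rewrite author's own statement) =====
-- stated objective: simpler
-- what changed: Replaces the accumulating enumerate loop with a direct closed-form range built from index() of the first solid cell and count() of solid cells.
import Mathlib
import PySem

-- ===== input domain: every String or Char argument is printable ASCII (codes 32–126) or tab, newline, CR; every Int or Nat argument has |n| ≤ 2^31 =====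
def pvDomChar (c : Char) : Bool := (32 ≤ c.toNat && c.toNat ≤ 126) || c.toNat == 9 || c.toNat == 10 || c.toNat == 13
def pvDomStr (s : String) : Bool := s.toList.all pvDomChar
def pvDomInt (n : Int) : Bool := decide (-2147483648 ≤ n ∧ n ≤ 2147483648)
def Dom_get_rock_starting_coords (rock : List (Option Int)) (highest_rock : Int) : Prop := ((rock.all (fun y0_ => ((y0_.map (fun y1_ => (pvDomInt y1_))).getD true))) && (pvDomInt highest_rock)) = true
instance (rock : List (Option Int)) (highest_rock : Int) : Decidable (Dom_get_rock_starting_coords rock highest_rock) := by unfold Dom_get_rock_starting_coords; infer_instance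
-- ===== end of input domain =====

-- B replaces A's accumulating enumerate loop with a closed-form single range (first index + count); objective: simpler.


-- ===== PORT A =====
-- 'coords[-1][1] += 1': increment entry 1 of the last element (only called with coords nonempty)
def pvBumpLast1 (coords : List (List Int)) : List (List Int) :=
  match coords with
  | [] => []
  | [c] => [c.modify 1 (· + 1)]
  | c :: rest => c :: pvBumpLast1 rest

def get_rock_starting_coords (rock : List (Option Int)) (highest_rock : Int) : List (List Int) :=
  (PySem.List.enumerate rock).foldl
    (fun coords p =>
      if p.2 == some 1 then
        if coords ≠ [] then pvBumpLast1 coords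
        else coords ++ [[highest_rock + 4 + p.1, highest_rock + 4 + p.1]]
      else coords) []

-- ===== PORT B =====
def get_rock_starting_coords_alt (rock : List (Option Int)) (highest_rock : Int) : List (List Int) :=
  match PySem.List.index? rock (some 1) with
  | none => []
  | some first =>
      let start := highest_rock + 4 + (first : Int)
      [[start, start + (PySem.List.count rock (some 1) : Int) - 1]]

-- ===== PRECONDITION & SPEC =====
def Spec_get_rock_starting_coords (rock : List (Option Int)) (highest_rock : Int) (out : List (List Int)) : Prop := out = get_rock_starting_coords_alt rock highest_rock
instance (rock : List (Option Int)) (highest_rock : Int) (out : List (List Int)) : Decidable (Spec_get_rock_starting_coords rock highest_rock out) := by unfold Spec_get_rock_starting_coords; infer_instance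

-- ===== CLAIM (what is proved, stated in full; the proofs are below) =====
def Claim_equal_get_rock_starting_coords : Prop := ∀ (rock : List (Option Int)) (highest_rock : Int), Dom_get_rock_starting_coords rock highest_rock → Spec_get_rock_starting_coords rock highest_rock (get_rock_starting_coords rock highest_rock)

-- ===== LEMMAS AND PROOFS =====

-- Once the accumulator holds one range [[a,b]], the rest of the fold just adds the count of solid cells to b.
theorem foldA_nonempty (hr : Int) (l : List (Int × Option Int)) (a : Int) : ∀ (b : Int),
    l.foldl
      (fun coords p =>
        if p.2 == some 1 then
          if coords ≠ [] then pvBumpLast1 coords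
          else coords ++ [[hr + 4 + p.1, hr + 4 + p.1]]
        else coords) [[a, b]]
    = [[a, b + (l.countP (fun p => p.2 == some 1) : Int)]] := by
  induction l with
  | nil => intro b; simp
  | cons x xs ih =>
    intro b
    by_cases hx : x.2 = some 1
    · have hstep : (if x.2 == some 1 then
          if ([[a, b]] : List (List Int)) ≠ [] then pvBumpLast1 [[a, b]]
          else [[a, b]] ++ [[hr + 4 + x.1, hr + 4 + x.1]]
        else [[a, b]]) = [[a, b + 1]] := by
        simp [hx, pvBumpLast1, List.modify]
      rw [List.foldl_cons, hstep, ih]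
      simp [List.countP_cons, hx]
      push_cast; ring
    · have hstep : (if x.2 == some 1 then
          if ([[a, b]] : List (List Int)) ≠ [] then pvBumpLast1 [[a, b]]
          else [[a, b]] ++ [[hr + 4 + x.1, hr + 4 + x.1]]
        else [[a, b]]) = [[a, b]] := by simp [hx]
      rw [List.foldl_cons, hstep, ih]
      simp [List.countP_cons, hx]

theorem enum_countP (xs : List (Option Int)) (s : Int) :
    (PySem.List.enumerate xs s).countP (fun p => p.2 == some 1) = xs.count (some 1) := by
  rw [show (fun (p : Int × Option Int) => p.2 == some 1) = ((fun y => y == some 1) ∘ Prod.snd) from rfl,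
      List.countP_map.symm, PySem.List.map_snd_enumerate, List.count]

theorem main_lemma (hr : Int) (rock : List (Option Int)) : ∀ (s : Int),
    (PySem.List.enumerate rock s).foldl
      (fun coords p =>
        if p.2 == some 1 then
          if coords ≠ [] then pvBumpLast1 coords
          else coords ++ [[hr + 4 + p.1, hr + 4 + p.1]]
        else coords) []
    = match PySem.List.index? rock (some 1) with
      | none => []
      | some first => [[hr + 4 + s + (first : Int),
                        hr + 4 + s + (first : Int) + (PySem.List.count rock (some 1) : Int) - 1]] := by
  induction rock with
  | nil => intro s; simp [PySem.List.enumerate_nil, PySem.List.index?]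
  | cons x xs ih =>
    intro s
    rw [PySem.List.enumerate_cons, List.foldl_cons]
    by_cases hx : x = some 1
    · have hstep : (if ((s, x) : Int × Option Int).2 == some 1 then
          if ([] : List (List Int)) ≠ [] then pvBumpLast1 []
          else [] ++ [[hr + 4 + ((s, x) : Int × Option Int).1, hr + 4 + ((s, x) : Int × Option Int).1]]
        else []) = [[hr + 4 + s, hr + 4 + s]] := by simp [hx]
      rw [hstep, foldA_nonempty, enum_countP, hx, PySem.List.index?_cons_self]
      simp [PySem.List.count, List.count_cons]
      push_cast; ring
    · have hstep : (if ((s, x) : Int × Option Int).2 == some 1 then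
          if ([] : List (List Int)) ≠ [] then pvBumpLast1 []
          else [] ++ [[hr + 4 + ((s, x) : Int × Option Int).1, hr + 4 + ((s, x) : Int × Option Int).1]]
        else []) = [] := by simp [hx]
      rw [hstep, ih (s + 1), PySem.List.index?_cons_of_ne xs hx]
      cases h : PySem.List.index? xs (some 1) with
      | none => simp
      | some k =>
        simp [PySem.List.count, List.count_cons, hx, List.cons.injEq]
        push_cast
        omega

-- ===== VERDICT (by name: the statement is the Claim_ definition above) =====
theorem get_rock_starting_coords_spec : Claim_equal_get_rock_starting_coords := by
  intro rock highest_rock _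
  unfold Spec_get_rock_starting_coords get_rock_starting_coords get_rock_starting_coords_alt
  rw [main_lemma highest_rock rock 0]
  cases h : PySem.List.index? rock (some 1) with
  | none => rfl
  | some k => norm_num
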